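-- pv_equiv track=rewrite | github.com/nitekat1124/advent-of-code-2017 | solutions/day09.py | part2
-- ===== SOURCE A (Python) =====
-- def part2(data):
--     stream = data[0]
--     while "!" in stream:
--         idx = stream.index("!")
--         stream = stream[:idx] + stream[idx + 2 :]
--
--     garbage_length = 0
--     while "<" in stream:
--         idx = stream.index("<")
--         idx2 = stream.index(">", idx)
--         stream = stream[:idx] + stream[idx2 + 1 :]
--         garbage_length += idx2 - idx - 1
--
--     return garbage_length
-- ===== SOURCE B (Python) =====
-- def part2(data):
--     stream = data[0]
--     skip = False
--     in_garbage = False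
--     count = 0
--     for c in stream:
--         if skip:
--             skip = False
--         elif c == "!":
--             skip = True
--         elif in_garbage:
--             if c == ">":
--                 in_garbage = False
--             else:
--                 count += 1
--         elif c == "<":
--             in_garbage = True
--     return count
-- ===== Notes on version B (the rewrite author's own statement) =====
-- stated objective: alternative
-- what changed: replaced the two repeated find-and-splice passes (re-scanning and rebuilding the string after every '!' and every <...> segment) with a single left-to-right pass over the characters maintaining an escape flag, an in-garbage flag and a counter; it trades A's C-level slicing for one interpreted per-character loop, so it is not measurably faster
import Mathlib
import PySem

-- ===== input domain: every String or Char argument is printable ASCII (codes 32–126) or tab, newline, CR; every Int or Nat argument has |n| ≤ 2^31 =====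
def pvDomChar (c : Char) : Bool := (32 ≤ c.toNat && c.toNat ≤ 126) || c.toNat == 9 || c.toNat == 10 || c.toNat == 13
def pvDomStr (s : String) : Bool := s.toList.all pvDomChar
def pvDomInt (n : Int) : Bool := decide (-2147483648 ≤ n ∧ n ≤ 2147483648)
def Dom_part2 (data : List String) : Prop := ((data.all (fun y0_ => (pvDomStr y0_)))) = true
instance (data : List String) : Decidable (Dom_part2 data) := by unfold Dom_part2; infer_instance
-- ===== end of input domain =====

-- B replaces A's repeated find-and-splice passes by one left-to-right state machine pass.

-- ===== PORT A =====
-- A works on the string; the port works on its character list, where str.index = List.idxOf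
-- and the nonnegative slices stream[:idx] / stream[i:] are exactly List.take idx / List.drop i.

-- while "!" in stream: idx = stream.index("!"); stream = stream[:idx] + stream[idx+2:]
def stripLoop (s : List Char) : List Char :=
  if _h : '!' ∈ s then
    stripLoop (s.take (s.idxOf '!') ++ s.drop (s.idxOf '!' + 2))
  else s
termination_by s.length
decreasing_by
  have hlt := List.idxOf_lt_length_of_mem _h
  simp only [List.length_append, List.length_take, List.length_drop]
  omega

-- while "<" in stream: idx = stream.index("<"); idx2 = stream.index(">", idx); splice; count += idx2-idx-1
def garbLoop (s : List Char) (acc : Int) : Int :=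
  if h : '<' ∈ s then
    let idx := s.idxOf '<'
    if h2 : '>' ∈ s.drop idx then
      let idx2 := idx + (s.drop idx).idxOf '>'
      garbLoop (s.take idx ++ s.drop (idx2 + 1)) (acc + ((idx2 : Int) - (idx : Int) - 1))
    else acc  -- Python raises ValueError here; excluded by Pre_part2
  else acc
termination_by s.length
decreasing_by
  have h3 := List.idxOf_lt_length_of_mem h2
  have h4 := List.idxOf_lt_length_of_mem h
  simp only [List.length_drop] at h3
  simp only [List.length_append, List.length_take, List.length_drop]
  omega

def part2 (data : List String) : Int :=
  match PySem.List.pyGet? data 0 with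
  | none => 0  -- Python raises IndexError on data[0]; excluded by Pre_part2
  | some st => garbLoop (stripLoop st.toList) 0

-- ===== PORT B =====
-- single pass, state = (skip, in_garbage, count), branches in Source B's order
def stepB (st : Bool × Bool × Int) (c : Char) : Bool × Bool × Int :=
  if st.1 then (false, st.2.1, st.2.2)
  else if c = '!' then (true, st.2.1, st.2.2)
  else if st.2.1 then
    if c = '>' then (false, false, st.2.2) else (false, true, st.2.2 + 1)
  else if c = '<' then (false, true, st.2.2)
  else st

def part2_alt (data : List String) : Int :=
  match PySem.List.pyGet? data 0 with
  | none => 0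
  | some st => (st.toList.foldl stepB (false, false, (0 : Int))).2.2

-- ===== PRECONDITION & SPEC =====
-- helpers for Pre_ (shared by neither port): the escape-removed character list, and the
-- check that every '<' in it is followed by some '>'
def stripF : List Char → List Char
  | [] => []
  | '!' :: [] => []
  | '!' :: _ :: r => stripF r
  | c :: r => c :: stripF r

def okB : List Char → Bool
  | [] => true
  | c :: r => (c != '<' || r.contains '>') && okB r

-- Pre_ excludes exactly the inputs where A raises: the empty list (IndexError on data[0]) and
-- streams whose escape-removed form has a '<' with no later '>' (ValueError on index(">", idx)).
def Pre_part2 (data : List String) : Prop :=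
  data ≠ [] ∧ okB (stripF (data.headD "").toList) = true
instance (data : List String) : Decidable (Pre_part2 data) := by unfold Pre_part2; infer_instance

def pvWitness_part2 : List String := ["{<a!>b>,<cd>}"]

def Spec_part2 (data : List String) (out : Int) : Prop := out = part2_alt data
instance (data : List String) (out : Int) : Decidable (Spec_part2 data out) := by unfold Spec_part2; infer_instance

-- ===== CLAIM (what is proved, stated in full; the proofs are below) =====
def Claim_equal_part2 : Prop := ∀ (data : List String), Dom_part2 data → Pre_part2 data → Spec_part2 data (part2 data)

-- ===== LEMMAS AND PROOFS =====

-- the escape-free garbage state machine, common reference point of both proofs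
def g2 : List Char → Bool → Int → Int
  | [], _, acc => acc
  | c :: r, g, acc =>
    if g then (if c = '>' then g2 r false acc else g2 r true (acc + 1))
    else (if c = '<' then g2 r true acc else g2 r false acc)

lemma exists_split (c : Char) (s : List Char) (h : c ∈ s) :
    ∃ a t, s = a ++ c :: t ∧ c ∉ a ∧ s.idxOf c = a.length := by
  induction s with
  | nil => simp at h
  | cons d r ih =>
    by_cases hd : d = c
    · exact ⟨[], r, by simp [hd], by simp, by simp [hd, List.idxOf_cons_self]⟩
    · obtain ⟨a, t, h1, h2, h3⟩ :=
        ih ((List.mem_cons.mp h).resolve_left (fun hh => hd hh.symm))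
      refine ⟨d :: a, t, by simp [h1], ?_, by simp [hd, h3]⟩
      intro hh
      rcases List.mem_cons.mp hh with hh | hh
      · exact hd hh.symm
      · exact h2 hh

lemma stripF_nil : stripF [] = [] := rfl

lemma stripF_bang (t : List Char) : stripF ('!' :: t) = stripF (t.drop 1) := by
  cases t <;> rfl

lemma stripF_cons (c : Char) (r : List Char) (hc : c ≠ '!') :
    stripF (c :: r) = c :: stripF r := by
  rw [stripF.eq_def]; cases r <;> simp [hc]

lemma stripF_no (s : List Char) (h : '!' ∉ s) : stripF s = s := by
  induction s with
  | nil => exact stripF_nil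
  | cons c r ih =>
    have hc : c ≠ '!' := fun hh => h (hh ▸ List.mem_cons_self ..)
    rw [stripF_cons c r hc, ih (fun hh => h (List.mem_cons_of_mem _ hh))]

lemma stripF_append (a u : List Char) (h : '!' ∉ a) :
    stripF (a ++ u) = a ++ stripF u := by
  induction a with
  | nil => rfl
  | cons c r ih =>
    have hc : c ≠ '!' := fun hh => h (hh ▸ List.mem_cons_self ..)
    have hr : '!' ∉ r := fun hh => h (List.mem_cons_of_mem _ hh)
    simp only [List.cons_append, stripF_cons c (r ++ u) hc, ih hr]

lemma stripLoop_eq (s : List Char) : stripLoop s = stripF s := by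
  induction s using stripLoop.induct with
  | case1 s h ih =>
    rw [stripLoop, dif_pos h]
    obtain ⟨a, t, h1, h2, h3⟩ := exists_split '!' s h
    have htake : s.take (s.idxOf '!') = a := by rw [h3, h1]; simp
    have hdrop : s.drop (s.idxOf '!' + 2) = t.drop 1 := by
      rw [h3, h1]; simp [List.drop_append]
    rw [htake, hdrop] at ih ⊢
    rw [ih, stripF_append _ _ h2, h1, stripF_append _ _ h2, stripF_bang]
  | case2 s h =>
    rw [stripLoop, dif_neg h]
    exact (stripF_no s h).symm

lemma okB_append_free (a x : List Char) (h : '<' ∉ a) : okB (a ++ x) = okB x := by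
  induction a with
  | nil => rfl
  | cons c r ih =>
    have hc : c ≠ '<' := fun hh => h (hh ▸ List.mem_cons_self ..)
    simp [okB, hc, ih (fun hh => h (List.mem_cons_of_mem _ hh))]

lemma okB_append_true (x y : List Char) (h : okB (x ++ y) = true) : okB y = true := by
  induction x with
  | nil => exact h
  | cons c r ih =>
    simp only [List.cons_append, okB, Bool.and_eq_true] at h
    exact ih h.2

lemma g2_nil (g : Bool) (acc : Int) : g2 [] g acc = acc := rfl

lemma g2_cons_false (c : Char) (r : List Char) (acc : Int) :
    g2 (c :: r) false acc = if c = '<' then g2 r true acc else g2 r false acc := by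
  simp [g2]

lemma g2_cons_true (c : Char) (r : List Char) (acc : Int) :
    g2 (c :: r) true acc = if c = '>' then g2 r false acc else g2 r true (acc + 1) := by
  simp [g2]

lemma g2_no_lt (t : List Char) (acc : Int) (h : '<' ∉ t) : g2 t false acc = acc := by
  induction t generalizing acc with
  | nil => rfl
  | cons c r ih =>
    have hc : c ≠ '<' := fun hh => h (hh ▸ List.mem_cons_self ..)
    rw [g2_cons_false, if_neg hc]
    exact ih acc (fun hh => h (List.mem_cons_of_mem _ hh))

lemma g2_skip_free (a x : List Char) (acc : Int) (h : '<' ∉ a) :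
    g2 (a ++ x) false acc = g2 x false acc := by
  induction a generalizing acc with
  | nil => rfl
  | cons c r ih =>
    have hc : c ≠ '<' := fun hh => h (hh ▸ List.mem_cons_self ..)
    rw [List.cons_append, g2_cons_false, if_neg hc]
    exact ih acc (fun hh => h (List.mem_cons_of_mem _ hh))

lemma g2_garb (b x : List Char) (acc : Int) (h : '>' ∉ b) :
    g2 (b ++ x) true acc = g2 x true (acc + b.length) := by
  induction b generalizing acc with
  | nil => simp
  | cons c r ih =>
    have hc : c ≠ '>' := fun hh => h (hh ▸ List.mem_cons_self ..)
    rw [List.cons_append, g2_cons_true, if_neg hc,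
      ih (acc + 1) (fun hh => h (List.mem_cons_of_mem _ hh))]
    congr 1
    simp only [List.length_cons]
    push_cast
    ring

lemma garbLoop_eq (s : List Char) (acc : Int) :
    okB s = true → garbLoop s acc = g2 s false acc := by
  induction s, acc using garbLoop.induct with
  | case1 s acc hc idx h2 idx2 ih =>
    intro h
    have h2x : '>' ∈ List.drop (List.idxOf '<' s) s := h2
    rw [garbLoop]
    simp only [dif_pos hc, dif_pos h2x]
    obtain ⟨a, u, h1, h2', h3⟩ := exists_split '<' s hc
    have htake : s.take (s.idxOf '<') = a := by rw [h3, h1]; simp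
    have hdropidx : s.drop (s.idxOf '<') = '<' :: u := by rw [h3, h1]; simp
    have hok_u : okB ('<' :: u) = true := by
      rw [h1, okB_append_free _ _ h2'] at h
      exact h
    have hgt : '>' ∈ u := by
      simp only [okB, Bool.and_eq_true, Bool.or_eq_true] at hok_u
      rcases hok_u.1 with h' | h'
      · simp at h'
      · simpa using h'
    obtain ⟨b, v, hu1, hu2, hu3⟩ := exists_split '>' u hgt
    have hidx2 : (s.drop (s.idxOf '<')).idxOf '>' = b.length + 1 := by
      rw [hdropidx, List.idxOf_cons]
      simp [hu3]
    have hdrop2 : s.drop (s.idxOf '<' + ((s.drop (s.idxOf '<')).idxOf '>') + 1) = v := by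
      rw [hidx2, h3, h1, hu1]
      rw [show a.length + (b.length + 1) + 1 = a.length + (b.length + 2) from by omega]
      simp [List.drop_append, List.drop_eq_nil_of_le]
    have hacc : acc + ((↑(s.idxOf '<' + (s.drop (s.idxOf '<')).idxOf '>') : Int) - (↑(s.idxOf '<') : Int) - 1) = acc + b.length := by
      rw [hidx2]
      push_cast
      ring
    rw [htake, hdrop2, hacc] at ih ⊢
    have hokav : okB (a ++ v) = true := by
      rw [okB_append_free _ _ h2']
      have : okB (b ++ '>' :: v) = true := by
        rw [hu1] at hok_u
        simp only [okB, Bool.and_eq_true] at hok_u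
        exact hok_u.2
      exact okB_append_true (b ++ ['>']) v (by simpa using this)
    rw [ih hokav, g2_skip_free _ _ _ h2', h1, hu1, g2_skip_free _ _ _ h2',
      g2_cons_false, if_pos rfl, g2_garb _ _ _ hu2, g2_cons_true, if_pos rfl]
  | case2 s acc hc idx h2 =>
    intro h
    exfalso
    obtain ⟨a, u, h1, h2', h3⟩ := exists_split '<' s hc
    have hdropidx : s.drop (s.idxOf '<') = '<' :: u := by rw [h3, h1]; simp
    have hok_u : okB ('<' :: u) = true := by
      rw [h1, okB_append_free _ _ h2'] at h
      exact h
    have hgt : '>' ∈ u := by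
      simp only [okB, Bool.and_eq_true, Bool.or_eq_true] at hok_u
      rcases hok_u.1 with h' | h'
      · simp at h'
      · simpa using h'
    apply h2
    show '>' ∈ s.drop (s.idxOf '<')
    rw [hdropidx]
    exact List.mem_cons_of_mem _ hgt
  | case3 s acc hc =>
    intro _
    rw [garbLoop, dif_neg hc]
    exact (g2_no_lt s acc hc).symm

lemma foldB_eq (s : List Char) (g : Bool) (acc : Int) :
    (s.foldl stepB (false, g, acc)).2.2 = g2 (stripF s) g acc := by
  induction s using stripF.induct generalizing g acc with
  | case1 => simp [stripF_nil, g2_nil]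
  | case2 =>
    show (stepB (false, g, acc) '!').2.2 = g2 (stripF ['!']) g acc
    simp [stepB, stripF, g2_nil]
  | case3 d r ih =>
    have h1 : stepB (false, g, acc) '!' = (true, g, acc) := by simp [stepB]
    have h2 : stepB (true, g, acc) d = (false, g, acc) := by simp [stepB]
    have h3 : stripF ('!' :: d :: r) = stripF r := rfl
    simp only [List.foldl_cons, h1, h2, h3]
    exact ih g acc
  | case4 c r hc1 hc2 ih =>
    have hc : c ≠ '!' := by
      intro he
      cases r with
      | nil => exact hc1 he rfl
      | cons d u => exact hc2 d u he rfl
    rw [stripF_cons c r hc]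
    cases g with
    | false =>
      rw [g2_cons_false]
      by_cases h4 : c = '<'
      · have h1 : stepB (false, false, acc) c = (false, true, acc) := by
          simp [stepB, h4]
        simp only [List.foldl_cons, h1, if_pos h4]
        exact ih true acc
      · have h1 : stepB (false, false, acc) c = (false, false, acc) := by
          simp [stepB, hc, h4]
        simp only [List.foldl_cons, h1, if_neg h4]
        exact ih false acc
    | true =>
      rw [g2_cons_true]
      by_cases h4 : c = '>'
      · have h1 : stepB (false, true, acc) c = (false, false, acc) := by
          simp [stepB, h4]
        simp only [List.foldl_cons, h1, if_pos h4]
        exact ih false acc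
      · have h1 : stepB (false, true, acc) c = (false, true, acc + 1) := by
          simp [stepB, hc, h4]
        simp only [List.foldl_cons, h1, if_neg h4]
        exact ih true (acc + 1)

-- ===== VERDICT (by name: the statement is the Claim_ definition above) =====
theorem part2_spec : Claim_equal_part2 := by
  intro data _ hpre
  unfold Spec_part2
  obtain ⟨hne, hok⟩ := hpre
  cases data with
  | nil => exact absurd rfl hne
  | cons st rest =>
    simp only [List.headD] at hok
    show part2 (st :: rest) = part2_alt (st :: rest)
    have hget : PySem.List.pyGet? (st :: rest) 0 = some st := by
      simp [PySem.List.pyGet?, PySem.List.pyIdx?]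
    simp only [part2, part2_alt, hget]
    rw [stripLoop_eq, garbLoop_eq _ _ hok, foldB_eq]
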